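-- pv_equiv track=rewrite | github.com/Kernelist/dynamic-production-planning-SQM-hybrid-simulator | backend/engines/mold_utils.py | count_mold_violations
-- ===== SOURCE A (Python) =====
-- def count_mold_violations(schedule: list, n_lines: int, n_slots: int) -> int:
--     """
--     스케줄에서 Mold 수량 제약 위반 슬롯 수 계산.
--     동일 슬롯에서 같은 Mold를 사용하는 라인 쌍 수를 반환.
--     """
--     violations = 0
--     for t in range(n_slots):
--         mold_at_slot = {}
--         for r in range(n_lines):
--             cell = schedule[r][t]
--             if cell is not None:
--                 mid = cell[3]
--                 mold_at_slot.setdefault(mid, []).append(r)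
--         # 동일 Mold가 여러 라인에서 사용되는 경우는 위반으로 표시 (단순 카운트)
--         for mid, lines in mold_at_slot.items():
--             if len(lines) > 1:
--                 violations += len(lines) - 1
--     return violations
-- ===== SOURCE B (Python) =====
-- def count_mold_violations(schedule: list, n_lines: int, n_slots: int) -> int:
--     """
--     Same count via a counting identity: every occupied cell contributes one,
--     every distinct (slot, mold) pair gets one back, so the number of
--     conflicting line pairs is  total occupied cells - distinct (slot, mold) pairs.
--     One row-major pass, no per-slot grouping.
--     """
--     if n_lines <= 0 or n_slots <= 0:
--         return 0
--     total = 0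
--     seen = set()
--     for r in range(n_lines):
--         for t in range(n_slots):
--             cell = schedule[r][t]
--             if cell is not None:
--                 total += 1
--                 seen.add((t, cell[3]))
--     return total - len(seen)
-- ===== Notes on version B (the rewrite author's own statement) =====
-- stated objective: simpler
-- what changed: Replaces the per-slot dict-of-lists grouping plus a second loop summing len(lines)-1 by a single row-major pass that counts occupied cells and collects distinct (slot, mold) pairs in one set, returning total - len(seen).
import Mathlib
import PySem

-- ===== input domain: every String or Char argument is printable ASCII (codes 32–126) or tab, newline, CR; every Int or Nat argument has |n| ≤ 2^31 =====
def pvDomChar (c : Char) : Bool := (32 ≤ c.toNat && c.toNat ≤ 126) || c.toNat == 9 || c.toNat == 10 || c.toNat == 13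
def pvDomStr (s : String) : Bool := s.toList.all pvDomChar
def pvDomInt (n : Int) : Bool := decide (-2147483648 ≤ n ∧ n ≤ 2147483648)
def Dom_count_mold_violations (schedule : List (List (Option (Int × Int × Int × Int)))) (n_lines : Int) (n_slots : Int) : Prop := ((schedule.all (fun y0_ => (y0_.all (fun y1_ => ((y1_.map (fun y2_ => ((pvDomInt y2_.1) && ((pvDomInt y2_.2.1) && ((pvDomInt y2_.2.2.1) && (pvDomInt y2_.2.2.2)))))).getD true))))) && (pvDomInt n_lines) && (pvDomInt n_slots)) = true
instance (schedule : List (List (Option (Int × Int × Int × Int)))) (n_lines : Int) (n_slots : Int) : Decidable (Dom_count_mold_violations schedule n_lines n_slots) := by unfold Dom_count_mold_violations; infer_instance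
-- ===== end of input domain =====

-- B replaces A's per-slot dict-of-lists grouping (plus a second summing loop) by one row-major
-- pass computing (occupied cells) - (distinct (slot, mold) pairs); objective: simpler.

-- ===== PORT A =====
-- 'mold_at_slot.setdefault(mid, []).append(r)' is ported as 'd.modify mid [] (fun lines => lines ++ [r])',
-- which is exactly Python's in-place append through setdefault.
def count_mold_violations (schedule : List (List (Option (Int × Int × Int × Int)))) (n_lines : Int) (n_slots : Int) : Int :=
  (PySem.List.pyRange 0 n_slots).foldl (fun violations t =>
    let mold_at_slot : PySem.Dict Int (List Int) :=
      (PySem.List.pyRange 0 n_lines).foldl (fun d r =>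
        match PySem.List.pyGetD (PySem.List.pyGetD schedule r []) t none with
        | none => d
        | some cell => d.modify cell.2.2.2 [] (fun lines => lines ++ [r]))
        PySem.Dict.empty
    mold_at_slot.items.foldl (fun violations p =>
      if 1 < p.2.length then violations + ((p.2.length : Int) - 1) else violations) violations)
    0

-- ===== PORT B =====
def count_mold_violations_alt (schedule : List (List (Option (Int × Int × Int × Int)))) (n_lines : Int) (n_slots : Int) : Int :=
  if n_lines ≤ 0 ∨ n_slots ≤ 0 then 0 else
  let st := (PySem.List.pyRange 0 n_lines).foldl (fun st r =>
      (PySem.List.pyRange 0 n_slots).foldl (fun st t =>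
        match PySem.List.pyGetD (PySem.List.pyGetD schedule r []) t none with
        | none => st
        | some cell => (st.1 + 1, PySem.Set.add st.2 (t, cell.2.2.2))) st)
    ((0 : Int), (PySem.Set.empty : PySem.Set (Int × Int)))
  st.1 - PySem.Set.len st.2

-- ===== PRECONDITION & SPEC =====
-- Pre_ excludes exactly the inputs on which Python A raises IndexError: when both loop ranges are
-- non-empty, the schedule must have at least n_lines rows and each of those rows at least n_slots cells.
def Pre_count_mold_violations (schedule : List (List (Option (Int × Int × Int × Int)))) (n_lines : Int) (n_slots : Int) : Prop :=
  0 < n_lines → 0 < n_slots →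
    (n_lines ≤ (schedule.length : Int) ∧ ∀ row ∈ schedule.take n_lines.toNat, n_slots ≤ (row.length : Int))
instance (schedule : List (List (Option (Int × Int × Int × Int)))) (n_lines : Int) (n_slots : Int) : Decidable (Pre_count_mold_violations schedule n_lines n_slots) := by unfold Pre_count_mold_violations; infer_instance

def pvWitness_count_mold_violations : (List (List (Option (Int × Int × Int × Int)))) × Int × Int :=
  ([[some (1, 1, 1, 1), none], [none, some (2, 2, 2, 1)]], 2, 2)

def Spec_count_mold_violations (schedule : List (List (Option (Int × Int × Int × Int)))) (n_lines : Int) (n_slots : Int) (out : Int) : Prop := out = count_mold_violations_alt schedule n_lines n_slots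
instance (schedule : List (List (Option (Int × Int × Int × Int)))) (n_lines : Int) (n_slots : Int) (out : Int) : Decidable (Spec_count_mold_violations schedule n_lines n_slots out) := by unfold Spec_count_mold_violations; infer_instance

-- ===== CLAIM (what is proved, stated in full; the proofs are below) =====
def Claim_equal_count_mold_violations : Prop := ∀ (schedule : List (List (Option (Int × Int × Int × Int)))) (n_lines : Int) (n_slots : Int), Dom_count_mold_violations schedule n_lines n_slots → Pre_count_mold_violations schedule n_lines n_slots → Spec_count_mold_violations schedule n_lines n_slots (count_mold_violations schedule n_lines n_slots)

-- ===== LEMMAS AND PROOFS =====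

-- A's inner dict-building loop, rewritten as a fold over the (key, value) pairs it inserts.
theorem pvDictFold (c : Nat → Nat → Option (Int × Int × Int × Int)) (t : Nat) (l : List Nat)
    (d : PySem.Dict Int (List Int)) :
    l.foldl (fun d r =>
        match c r t with
        | none => d
        | some cell => d.modify cell.2.2.2 [] (fun lines => lines ++ [(r : Int)])) d
    = (l.filterMap (fun r => (c r t).map (fun cell => (cell.2.2.2, (r : Int))))).foldl
        (fun d p => d.modify p.1 [] (fun lines => lines ++ [p.2])) d := by
  induction l generalizing d with
  | nil => rfl
  | cons r l ih =>
    cases h : c r t with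
    | none => simp only [List.foldl_cons, List.filterMap_cons, h, Option.map_none, ih]
    | some cell => simp only [List.foldl_cons, List.filterMap_cons, h, Option.map_some, ih]

theorem pvUpdateCons {α : Type} [BEq α] (s : PySem.Set α) (x : α) (l : List α) :
    PySem.Set.update s (x :: l) = PySem.Set.update (PySem.Set.add s x) l := rfl

theorem pvUpdateAppend {α : Type} [BEq α] (s : PySem.Set α) (xs ys : List α) :
    PySem.Set.update s (xs ++ ys) = PySem.Set.update (PySem.Set.update s xs) ys := by
  induction xs generalizing s with
  | nil => rfl
  | cons x xs ih => rw [List.cons_append, pvUpdateCons, pvUpdateCons, ih]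

theorem pvUpdateNilOfList {α : Type} [BEq α] (l : List α) :
    PySem.Set.update ([] : PySem.Set α) l = PySem.Set.ofList l := by
  rw [PySem.Set.ofList_eq_foldl]; rfl

theorem pvUpdateEmptyOfList {α : Type} [BEq α] (l : List α) :
    PySem.Set.update (PySem.Set.empty : PySem.Set α) l = PySem.Set.ofList l := by
  rw [PySem.Set.ofList_eq_foldl]; rfl

theorem pvSetLen {α : Type} (s : PySem.Set α) : PySem.Set.len s = (s.length : Int) := rfl

-- length of a PySem dedup = Finset card of the underlying list
theorem pvDedupLen {α : Type} [DecidableEq α] [BEq α] [LawfulBEq α] (X : List α) :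
    (PySem.List.dedup X).length = X.toFinset.card := by
  rw [← List.toFinset_card_of_nodup (PySem.List.nodup_dedup X)]
  congr 1
  ext a
  simp

-- list-range sum vs Finset-range sum
theorem pvListSumRange {M : Type} [AddCommMonoid M] (n : Nat) (f : Nat → M) :
    ∑ i ∈ Finset.range n, f i = ((List.range n).map f).sum := by
  rw [← List.toFinset_range, List.sum_toFinset f List.nodup_range]

theorem pvCountRange (n : Nat) (p : Nat → Bool) :
    (((List.range n).countP p : Nat)) = ∑ i ∈ Finset.range n, (if p i then 1 else 0) := by
  induction n with
  | zero => simp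
  | succ n ih =>
    rw [List.range_succ, List.countP_append, Finset.sum_range_succ, ih]
    simp [List.countP_cons]

-- summing A's per-slot dict items: value = (#cells inserted) - (#distinct keys)
theorem pvItemsFold (P : List (Int × Int)) (v0 : Int) :
    ((P.foldl (fun d p => d.modify p.1 [] (fun lines => lines ++ [p.2]))
        (PySem.Dict.empty : PySem.Dict Int (List Int))).items).foldl
      (fun violations p => if 1 < p.2.length then violations + ((p.2.length : Int) - 1) else violations) v0
    = v0 + ((P.length : Int) - ((PySem.List.dedup (P.map (fun p => p.1))).length : Int)) := by
  have hkeys : (P.foldl (fun d p => d.modify p.1 [] (fun lines => lines ++ [p.2]))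
      (PySem.Dict.empty : PySem.Dict Int (List Int))).keys = PySem.List.dedup (P.map (fun p => p.1)) := by
    rw [PySem.Dict.keys_foldl_modify_key P (fun p => p.1) [] (fun _ p => (fun lines => lines ++ [p.2]))]
    show PySem.Set.update ([] : PySem.Set Int) (P.map (fun p => p.1)) = _
    rw [pvUpdateNilOfList, PySem.List.dedup_eq_ofList]
  have hnodup : (P.foldl (fun d p => d.modify p.1 [] (fun lines => lines ++ [p.2]))
      (PySem.Dict.empty : PySem.Dict Int (List Int))).keys.Nodup := by
    rw [hkeys]; exact PySem.List.nodup_dedup _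
  rw [PySem.Dict.items_eq_map_keys _ hnodup [], hkeys, List.foldl_map]
  have hget : ∀ k : Int, (P.foldl (fun d p => d.modify p.1 [] (fun lines => lines ++ [p.2]))
      (PySem.Dict.empty : PySem.Dict Int (List Int))).getD k []
      = (P.filter (fun p => p.1 == k)).map (fun p => p.2) := by
    intro k
    rw [PySem.Dict.getD_foldl_modify_append P _ k]
    rfl
  have hlen : ∀ k : Int, ((P.filter (fun p => p.1 == k)).map (fun p => p.2)).length
      = List.count k (P.map (fun p => p.1)) := by
    intro k
    rw [List.length_map, ← List.countP_eq_length_filter, List.count, List.countP_map]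
    rfl
  simp only [hget, hlen]
  have hbody : (fun (violations : Int) (k : Int) =>
        if 1 < List.count k (P.map (fun p => p.1))
        then violations + ((List.count k (P.map (fun p => p.1)) : Int) - 1) else violations)
      = fun (violations : Int) (k : Int) => violations +
          (if 1 < List.count k (P.map (fun p => p.1))
            then (List.count k (P.map (fun p => p.1)) : Int) - 1 else 0) := by
    funext violations k
    by_cases h : 1 < List.count k (P.map (fun p => p.1)) <;> simp [h]
  rw [hbody, PySem.List.foldl_add]
  have hmap : (PySem.List.dedup (P.map (fun p => p.1))).map
        (fun k => if 1 < List.count k (P.map (fun p => p.1))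
          then (List.count k (P.map (fun p => p.1)) : Int) - 1 else 0)
      = (PySem.List.dedup (P.map (fun p => p.1))).map
        (fun k => (List.count k (P.map (fun p => p.1)) : Int) + (-1)) := by
    refine List.map_congr_left (fun k hk => ?_)
    have hmem : k ∈ P.map (fun p => p.1) := (PySem.List.mem_dedup _ _).1 hk
    have hpos : 0 < List.count k (P.map (fun p => p.1)) := List.count_pos_iff.2 hmem
    by_cases h : 1 < List.count k (P.map (fun p => p.1))
    · simp [h, sub_eq_add_neg]
    · have h1 : List.count k (P.map (fun p => p.1)) = 1 := by omega
      simp [h1]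
  rw [hmap, PySem.List.sum_map_add_int, PySem.List.sum_map_const_int]
  have hsum : ((PySem.List.dedup (P.map (fun p => p.1))).map
        (fun k => (List.count k (P.map (fun p => p.1)) : Int))).sum
      = ((P.map (fun p => p.1)).length : Int) := by
    rw [← List.sum_toFinset _ (PySem.List.nodup_dedup _)]
    have hfs : (PySem.List.dedup (P.map (fun p => p.1))).toFinset = (P.map (fun p => p.1)).toFinset := by
      ext a; simp
    rw [hfs, ← Nat.cast_sum, List.sum_toFinset_count_eq_length]
  rw [hsum, List.length_map]
  ring

-- B's inner (per-row) loop as a pair of closed-form accumulators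
theorem pvRowFold (c : Nat → Nat → Option (Int × Int × Int × Int)) (r : Nat) (l : List Nat)
    (st : Int × PySem.Set (Int × Int)) :
    l.foldl (fun st t =>
        match c r t with
        | none => st
        | some cell => (st.1 + 1, PySem.Set.add st.2 ((t : Int), cell.2.2.2))) st
    = (st.1 + ((l.filterMap (fun t => (c r t).map (fun cell => ((t : Int), cell.2.2.2)))).length : Int),
       PySem.Set.update st.2 (l.filterMap (fun t => (c r t).map (fun cell => ((t : Int), cell.2.2.2))))) := by
  induction l generalizing st with
  | nil => simp
  | cons t l ih =>
    cases h : c r t with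
    | none => simp only [List.foldl_cons, List.filterMap_cons, h, Option.map_none, ih]
    | some cell =>
      simp only [List.foldl_cons, List.filterMap_cons, h, Option.map_some, ih, pvUpdateCons,
        List.length_cons]
      refine Prod.ext ?_ rfl
      push_cast
      ring

-- B's outer loop
theorem pvOuterFold (c : Nat → Nat → Option (Int × Int × Int × Int)) (M : Nat) (l : List Nat)
    (st : Int × PySem.Set (Int × Int)) :
    l.foldl (fun st r =>
        (List.range M).foldl (fun st t =>
          match c r t with
          | none => st
          | some cell => (st.1 + 1, PySem.Set.add st.2 ((t : Int), cell.2.2.2))) st) st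
    = (st.1 + ((l.flatMap (fun r => (List.range M).filterMap
          (fun t => (c r t).map (fun cell => ((t : Int), cell.2.2.2))))).length : Int),
       PySem.Set.update st.2 (l.flatMap (fun r => (List.range M).filterMap
          (fun t => (c r t).map (fun cell => ((t : Int), cell.2.2.2)))))) := by
  induction l generalizing st with
  | nil => simp
  | cons r l ih =>
    rw [List.foldl_cons, pvRowFold, ih, List.flatMap_cons, pvUpdateAppend]
    refine Prod.ext ?_ rfl
    simp only [List.length_append]
    push_cast
    ring

-- total occupied cells: column-major sum = row-major (flatMap) length
theorem pvLenTotal (g : Nat → Nat → Option Int) (N M : Nat) :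
    ∑ t ∈ Finset.range M, ((List.range N).filterMap (fun r => g r t)).length
    = ((List.range N).flatMap (fun r =>
        (List.range M).filterMap (fun t => (g r t).map (fun m => ((t : Int), m))))).length := by
  rw [List.length_flatMap, ← pvListSumRange]
  simp only [List.length_filterMap_eq_countP, Option.isSome_map, pvCountRange]
  exact Finset.sum_comm

-- distinct (slot, mold) pairs: per-slot distinct-mold counts sum to the overall distinct-pair count
theorem pvDistinct (g : Nat → Nat → Option Int) (N M : Nat) :
    ∑ t ∈ Finset.range M, (PySem.List.dedup ((List.range N).filterMap (fun r => g r t))).length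
    = (PySem.List.dedup ((List.range N).flatMap (fun r =>
        (List.range M).filterMap (fun t => (g r t).map (fun m => ((t : Int), m)))))).length := by
  simp only [pvDedupLen]
  have hset : ((List.range N).flatMap (fun r =>
        (List.range M).filterMap (fun t => (g r t).map (fun m => ((t : Int), m))))).toFinset
      = (Finset.range M).biUnion (fun t =>
          ((List.range N).filterMap (fun r => g r t)).toFinset.image (fun m => ((t : Int), m))) := by
    ext x
    obtain ⟨a, b⟩ := x
    simp only [List.mem_toFinset, List.mem_flatMap, List.mem_filterMap, List.mem_range,
      Finset.mem_biUnion, Finset.mem_range, Finset.mem_image, Option.map_eq_some_iff,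
      Prod.mk.injEq]
    constructor
    · rintro ⟨r, hr, t, ht, ⟨m, hm, rfl, rfl⟩⟩
      exact ⟨t, ht, m, ⟨r, hr, hm⟩, rfl, rfl⟩
    · rintro ⟨t, ht, m, ⟨r, hr, hm⟩, rfl, rfl⟩
      exact ⟨r, hr, t, ht, m, hm, rfl, rfl⟩
  rw [hset, Finset.card_biUnion]
  · refine Finset.sum_congr rfl (fun t _ => ?_)
    have hinj : Function.Injective (fun m : Int => ((t : Int), m)) :=
      fun m1 m2 h => ((Prod.mk.injEq _ _ _ _).mp h).2
    exact (Finset.card_image_of_injective _ hinj).symm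
  · intro t1 _ t2 _ hne
    simp only [Function.onFun]
    rw [Finset.disjoint_left]
    rintro ⟨a, b⟩ h1 h2
    simp only [Finset.mem_image, Prod.mk.injEq] at h1 h2
    obtain ⟨m1, -, hta1, -⟩ := h1
    obtain ⟨m2, -, hta2, -⟩ := h2
    have : (t1 : Int) = (t2 : Int) := hta1.trans hta2.symm
    exact hne (by exact_mod_cast this)

-- the master equivalence, over an abstract cell accessor and Nat-indexed loops
theorem pvKey (c : Nat → Nat → Option (Int × Int × Int × Int)) (N M : Nat) :
    (List.range M).foldl (fun violations t =>
        (((List.range N).foldl (fun d r =>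
              match c r t with
              | none => d
              | some cell => d.modify cell.2.2.2 [] (fun lines => lines ++ [(r : Int)]))
            (PySem.Dict.empty : PySem.Dict Int (List Int))).items).foldl
          (fun violations p =>
            if 1 < p.2.length then violations + ((p.2.length : Int) - 1) else violations)
          violations) 0
    = (let st := (List.range N).foldl (fun st r =>
          (List.range M).foldl (fun st t =>
              match c r t with
              | none => st
              | some cell => (st.1 + 1, PySem.Set.add st.2 ((t : Int), cell.2.2.2)))
            st) ((0 : Int), (PySem.Set.empty : PySem.Set (Int × Int)));
        st.1 - PySem.Set.len st.2) := by
  -- abbreviations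
  set g : Nat → Nat → Option Int := fun r t => (c r t).map (fun cell => cell.2.2.2) with hg
  -- A side
  have hA : ∀ (v : Int) (t : Nat),
      (((List.range N).foldl (fun d r =>
            match c r t with
            | none => d
            | some cell => d.modify cell.2.2.2 [] (fun lines => lines ++ [(r : Int)]))
          (PySem.Dict.empty : PySem.Dict Int (List Int))).items).foldl
        (fun violations p =>
          if 1 < p.2.length then violations + ((p.2.length : Int) - 1) else violations) v
      = v + ((((List.range N).filterMap (fun r => g r t)).length : Int)
            - ((PySem.List.dedup ((List.range N).filterMap (fun r => g r t))).length : Int)) := by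
    intro v t
    rw [pvDictFold, pvItemsFold]
    have h1 : ((List.range N).filterMap
          (fun r => (c r t).map (fun cell => (cell.2.2.2, (r : Int))))).map (fun p => p.1)
        = (List.range N).filterMap (fun r => g r t) := by
      rw [List.map_filterMap]
      simp [hg, Option.map_map, Function.comp_def]
    have h2 : ((List.range N).filterMap
          (fun r => (c r t).map (fun cell => (cell.2.2.2, (r : Int))))).length
        = ((List.range N).filterMap (fun r => g r t)).length := by
      rw [← h1, List.length_map]
    rw [h1, h2]
  have hAfun : (fun (violations : Int) (t : Nat) =>
        (((List.range N).foldl (fun d r =>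
              match c r t with
              | none => d
              | some cell => d.modify cell.2.2.2 [] (fun lines => lines ++ [(r : Int)]))
            (PySem.Dict.empty : PySem.Dict Int (List Int))).items).foldl
          (fun violations p =>
            if 1 < p.2.length then violations + ((p.2.length : Int) - 1) else violations)
          violations)
      = fun (violations : Int) (t : Nat) => violations +
          ((((List.range N).filterMap (fun r => g r t)).length : Int)
            - ((PySem.List.dedup ((List.range N).filterMap (fun r => g r t))).length : Int)) := by
    funext v t; exact hA v t
  rw [hAfun, PySem.List.foldl_add]
  -- B side
  have hmm : ∀ r t, (c r t).map (fun cell => ((t : Int), cell.2.2.2))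
      = (g r t).map (fun m => ((t : Int), m)) := by
    intro r t; simp [hg, Option.map_map, Function.comp_def]
  rw [pvOuterFold]
  simp only [hmm]
  rw [pvUpdateEmptyOfList, ← PySem.List.dedup_eq_ofList, pvSetLen, ← pvListSumRange,
    Finset.sum_sub_distrib, ← Nat.cast_sum, ← Nat.cast_sum, pvLenTotal g N M, pvDistinct g N M]
  ring

theorem pvFlatMapNil {α β : Type} (l : List α) : (l.flatMap fun _ => ([] : List β)) = [] := by
  induction l with
  | nil => rfl
  | cons x l ih => rw [List.flatMap_cons, List.nil_append, ih]

-- ===== VERDICT (by name: the statement is the Claim_ definition above) =====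
theorem count_mold_violations_spec : Claim_equal_count_mold_violations := by
  intro schedule n_lines n_slots _ _
  show count_mold_violations schedule n_lines n_slots = count_mold_violations_alt schedule n_lines n_slots
  unfold count_mold_violations count_mold_violations_alt
  simp only [PySem.List.pyRange_one, sub_zero, zero_add, List.foldl_map]
  by_cases h : n_lines ≤ 0 ∨ n_slots ≤ 0
  · rw [if_pos h,
      pvKey (fun r t => PySem.List.pyGetD (PySem.List.pyGetD schedule (r : Int) []) (t : Int) none)
        n_lines.toNat n_slots.toNat]
    rcases h with h | h
    · have hN : n_lines.toNat = 0 := by omega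
      rw [hN]
      simp
    · have hM : n_slots.toNat = 0 := by omega
      rw [hM, pvOuterFold]
      simp [pvFlatMapNil]
  · rw [if_neg h]
    exact pvKey (fun r t => PySem.List.pyGetD (PySem.List.pyGetD schedule (r : Int) []) (t : Int) none)
      n_lines.toNat n_slots.toNat
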